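-- pv_equiv track=rewrite | github.com/andrewdyates/tla2 | scripts/rust_function_span_scan.py | _raw_string_prefix
-- ===== SOURCE A (Python) =====
-- def _raw_string_prefix(source: str, start: int) -> tuple[int, int] | None:
--     """Return (prefix_len, hash_count) if a raw string starts at `start`."""
--     i = start
--     if i >= len(source):
--         return None
--     if source[i] == "b":
--         if i + 1 >= len(source) or source[i + 1] != "r":
--             return None
--         i += 2
--     elif source[i] == "r":
--         i += 1
--     else:
--         return None
--
--     hash_count = 0
--     while i < len(source) and source[i] == "#":
--         hash_count += 1
--         i += 1
--     if i < len(source) and source[i] == '"':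
--         return (i - start + 1, hash_count)
--     return None
-- ===== SOURCE B (Python) =====
-- def _raw_string_prefix(source: str, start: int) -> tuple[int, int] | None:
--     """Return (prefix_len, hash_count) if a raw string starts at `start`."""
--     tail = source[start:]
--     if tail.startswith("br"):
--         body = tail[2:]
--     elif tail.startswith("r"):
--         body = tail[1:]
--     else:
--         return None
--     stripped = body.lstrip("#")
--     if stripped.startswith('"'):
--         hashes = len(body) - len(stripped)
--         return (len(tail) - len(body) + hashes + 1, hashes)
--     return None
-- ===== Notes on version B (the rewrite author's own statement) =====
-- stated objective: idiomatic
-- what changed: Replaces the manual index-arithmetic character scan with slice/startswith/lstrip string operations on the tail source[start:], so no explicit index loop remains.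
-- outside the precondition, e.g. on _raw_string_prefix('"r', -1): A returns (2, 0), B returns None
import Mathlib
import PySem

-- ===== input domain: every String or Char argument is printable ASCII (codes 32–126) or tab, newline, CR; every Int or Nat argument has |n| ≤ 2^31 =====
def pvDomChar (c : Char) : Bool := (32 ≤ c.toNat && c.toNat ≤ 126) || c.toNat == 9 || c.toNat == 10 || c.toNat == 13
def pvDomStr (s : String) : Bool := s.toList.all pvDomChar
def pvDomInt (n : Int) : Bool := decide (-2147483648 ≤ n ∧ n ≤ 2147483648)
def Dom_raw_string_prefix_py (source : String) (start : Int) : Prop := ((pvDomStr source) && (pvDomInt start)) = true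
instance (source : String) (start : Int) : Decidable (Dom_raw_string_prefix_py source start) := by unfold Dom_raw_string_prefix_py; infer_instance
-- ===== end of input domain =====

-- B replaces A's manual index-arithmetic scan by slice/startswith/lstrip operations on the
-- tail source[start:] (idiomatic, no explicit index loop); equal on every start ≥ 0.


-- ===== PORT A =====
-- the `while i < len(source) and source[i] == '#'` loop, carrying (i, hash_count)
def rawLoopA (s : List Char) (i hc : Int) : Int × Int :=
  if h : i < (s.length : Int) ∧ PySem.List.pyGet? s i = some '#' then
    rawLoopA s (i + 1) (hc + 1)
  else (i, hc)
termination_by ((s.length : Int) - i).toNat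
decreasing_by omega

-- the code after the prefix has been consumed (i0 = index just past 'r'/'br')
def rawFinishA (s : List Char) (start i0 : Int) : Option (Int × Int) :=
  let p := rawLoopA s i0 0
  if p.1 < (s.length : Int) ∧ PySem.List.pyGet? s p.1 = some '"' then
    some (p.1 - start + 1, p.2)
  else none

def raw_string_prefix_py (source : String) (start : Int) : Option (Int × Int) :=
  let s := source.toList
  if (s.length : Int) ≤ start then none
  else
    match PySem.List.pyGet? s start with
    | none => none   -- source[start] raises IndexError here (start < -len); outside Pre_
    | some c =>
      if c = 'b' then
        if (s.length : Int) ≤ start + 1 ∨ PySem.List.pyGet? s (start + 1) ≠ some 'r' then none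
        else rawFinishA s start (start + 2)
      else if c = 'r' then rawFinishA s start (start + 1)
      else none

-- ===== PORT B =====
-- shared code of B after the prefix branch: body = tail[p:]
def altFinishB (tail body : List Char) : Option (Int × Int) :=
  let stripped := body.dropWhile (· == '#')   -- body.lstrip("#"): exact, the strip set is the single char '#'
  if PySem.Chars.startswith stripped ['"'] then
    let hashes : Int := (body.length : Int) - (stripped.length : Int)
    some ((tail.length : Int) - (body.length : Int) + hashes + 1, hashes)
  else none

def raw_string_prefix_py_alt (source : String) (start : Int) : Option (Int × Int) :=
  let tail := PySem.List.slice source.toList (some start) none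
  if PySem.Chars.startswith tail ['b', 'r'] then
    altFinishB tail (PySem.List.slice tail (some 2) none)
  else if PySem.Chars.startswith tail ['r'] then
    altFinishB tail (PySem.List.slice tail (some 1) none)
  else none

-- ===== PRECONDITION & SPEC =====
-- Pre_ excludes negative start, where A returns but its value rests on Python's from-end
-- indexing: A's scan can wrap from index -1 to the FRONT of the string mid-match while B's
-- slice clamps — both corner behaviours are accidents no caller of this scanner would specify.
def Pre_raw_string_prefix_py (source : String) (start : Int) : Prop := 0 ≤ start
instance (source : String) (start : Int) : Decidable (Pre_raw_string_prefix_py source start) := by unfold Pre_raw_string_prefix_py; infer_instance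

def pvWitness_raw_string_prefix_py : String × Int := ("br##\"x", 0)

def Spec_raw_string_prefix_py (source : String) (start : Int) (out : Option (Int × Int)) : Prop := out = raw_string_prefix_py_alt source start
instance (source : String) (start : Int) (out : Option (Int × Int)) : Decidable (Spec_raw_string_prefix_py source start out) := by unfold Spec_raw_string_prefix_py; infer_instance

-- ===== CLAIM (what is proved, stated in full; the proofs are below) =====
def Claim_equal_raw_string_prefix_py : Prop := ∀ (source : String) (start : Int), Dom_raw_string_prefix_py source start → Pre_raw_string_prefix_py source start → Spec_raw_string_prefix_py source start (raw_string_prefix_py source start)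

-- ===== LEMMAS AND PROOFS =====

-- common reference shape both ports are reduced to, phrased over the tail t = s.drop start
def refFin (p : Int) (rest : List Char) : Option (Int × Int) :=
  let k := (rest.takeWhile (· == '#')).length
  if (rest.dropWhile (· == '#'))[0]? = some '"' then some (p + k + 1, (k : Int)) else none

def refF (t : List Char) : Option (Int × Int) :=
  if t[0]? = some 'b' ∧ t[1]? = some 'r' then refFin 2 (t.drop 2)
  else if t[0]? = some 'r' then refFin 1 (t.drop 1)
  else none

lemma dropWhile_eq_drop_takeWhile (l : List Char) (p : Char → Bool) :
    l.dropWhile p = l.drop (l.takeWhile p).length := by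
  induction l with
  | nil => rfl
  | cons a l ih =>
    by_cases h : p a = true <;> simp [List.dropWhile, List.takeWhile, h, ih]

lemma startswith_single_iff (t : List Char) (c : Char) :
    PySem.Chars.startswith t [c] = true ↔ t[0]? = some c := by
  rw [PySem.Chars.startswith_iff]
  cases t with
  | nil => simp
  | cons a r => simp [List.cons_prefix_cons, eq_comm]

lemma startswith_pair_iff (t : List Char) (c d : Char) :
    PySem.Chars.startswith t [c, d] = true ↔ t[0]? = some c ∧ t[1]? = some d := by
  rw [PySem.Chars.startswith_iff]
  cases t with
  | nil => simp
  | cons a r =>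
    cases r with
    | nil => simp [List.cons_prefix_cons]
    | cons b r' => simp [List.cons_prefix_cons, eq_comm, and_comm]

lemma rawLoopA_eq (s : List Char) (m : Nat) (hc : Int) :
    rawLoopA s (m : Int) hc =
      ((m : Int) + ((s.drop m).takeWhile (· == '#')).length,
        hc + ((s.drop m).takeWhile (· == '#')).length) := by
  have key : ∀ fuel m (hc : Int), s.length - m ≤ fuel →
      rawLoopA s (m : Int) hc =
        ((m : Int) + ((s.drop m).takeWhile (· == '#')).length,
          hc + ((s.drop m).takeWhile (· == '#')).length) := by
    intro fuel
    induction fuel with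
    | zero =>
      intro m hc hle
      have hlen : s.length ≤ m := by omega
      rw [rawLoopA]
      simp [List.drop_eq_nil_of_le hlen, PySem.List.pyGet?_natCast,
        List.getElem?_eq_none (by omega : s.length ≤ m)]
    | succ fuel ih =>
      intro m hc hle
      by_cases hm : m < s.length
      · have hdrop := List.drop_eq_getElem_cons hm
        by_cases hh : s[m] = '#'
        · rw [rawLoopA]
          have hcond : ((m : Int) < (s.length : Int) ∧ PySem.List.pyGet? s (m : Int) = some '#') := by
            refine ⟨by exact_mod_cast hm, ?_⟩
            simp [PySem.List.pyGet?_natCast, List.getElem?_eq_getElem hm, hh]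
          rw [dif_pos hcond]
          have hcast : ((m : Int) + 1) = ((m + 1 : Nat) : Int) := by push_cast; ring
          rw [hcast, ih (m + 1) (hc + 1) (by omega), hdrop]
          simp [List.takeWhile, hh]
          constructor <;> omega
        · rw [rawLoopA]
          have hcond : ¬ ((m : Int) < (s.length : Int) ∧ PySem.List.pyGet? s (m : Int) = some '#') := by
            rintro ⟨-, hg⟩
            simp [PySem.List.pyGet?_natCast, List.getElem?_eq_getElem hm] at hg
            exact hh hg
          have hb : (s[m] == '#') = false := by simpa using hh
          rw [dif_neg hcond, hdrop]
          simp [List.takeWhile, hb]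
      · have hlen : s.length ≤ m := by omega
        rw [rawLoopA]
        simp [List.drop_eq_nil_of_le hlen, PySem.List.pyGet?_natCast,
          List.getElem?_eq_none (by omega : s.length ≤ m)]
  exact key (s.length - m) m hc (le_refl _)

-- the finishing code agrees with refFin, for a prefix of width p starting at n
lemma rawFinishA_eq (s : List Char) (n p : Nat) :
    rawFinishA s (n : Int) ((n : Int) + (p : Int)) = refFin (p : Int) (s.drop (n + p)) := by
  have hcast : ((n : Int) + (p : Int)) = ((n + p : Nat) : Int) := by push_cast; ring
  unfold rawFinishA refFin
  rw [hcast, rawLoopA_eq]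
  dsimp only
  set rest := s.drop (n + p) with hrest
  set k := (rest.takeWhile (· == '#')).length with hk
  have hknp : ((n + p : Nat) : Int) + (k : Int) = ((n + p + k : Nat) : Int) := by push_cast; ring
  rw [hknp]
  have hidx : (rest.dropWhile (· == '#'))[0]? = s[n + p + k]? := by
    rw [dropWhile_eq_drop_takeWhile, ← hk, hrest, List.drop_drop, List.getElem?_drop]
    simp
  by_cases hq : s[n + p + k]? = some '"'
  · have hlt : n + p + k < s.length := by
      by_contra hge
      rw [List.getElem?_eq_none (by omega)] at hq
      simp at hq
    rw [if_pos ⟨by exact_mod_cast hlt, by rw [PySem.List.pyGet?_natCast]; exact hq⟩,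
      if_pos (by rw [hidx]; exact hq)]
    simp only [Option.some.injEq, Prod.mk.injEq]
    refine ⟨by push_cast; ring, by ring⟩
  · rw [if_neg ?_, if_neg (by rw [hidx]; exact hq)]
    rintro ⟨hlt, hg⟩
    rw [PySem.List.pyGet?_natCast] at hg
    exact hq hg

lemma A_eq_ref (source : String) (n : Nat) :
    raw_string_prefix_py source (n : Int) = refF (source.toList.drop n) := by
  unfold raw_string_prefix_py refF
  set s := source.toList with hs
  by_cases hn : s.length ≤ n
  · rw [if_pos (by exact_mod_cast hn)]
    simp [List.drop_eq_nil_of_le hn]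
  · push Not at hn
    rw [if_neg (by push Not; exact_mod_cast hn)]
    rw [PySem.List.pyGet?_natCast, List.getElem?_eq_getElem hn]
    dsimp only
    have h0 : (s.drop n)[0]? = some s[n] := by
      rw [List.getElem?_drop]
      simp [List.getElem?_eq_getElem hn]
    have h1 : (s.drop n)[1]? = s[n + 1]? := by rw [List.getElem?_drop]
    have hc1 : ((n : Int) + 1) = ((n + 1 : Nat) : Int) := by push_cast; ring
    by_cases hb : s[n] = 'b'
    · rw [if_pos hb]
      by_cases hr : s[n + 1]? = some 'r'
      · have hcond : ¬ ((s.length : Int) ≤ (n : Int) + 1 ∨ PySem.List.pyGet? s ((n : Int) + 1) ≠ some 'r') := by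
          push Not
          have hlt : n + 1 < s.length := by
            by_contra hge
            rw [List.getElem?_eq_none (by omega)] at hr
            simp at hr
          exact ⟨by exact_mod_cast hlt, by rw [hc1, PySem.List.pyGet?_natCast]; exact hr⟩
        rw [if_neg hcond, if_pos ⟨by rw [h0, hb], by rw [h1]; exact hr⟩]
        have : ((n : Int) + 2) = (n : Int) + ((2 : Nat) : Int) := by norm_num
        rw [this, rawFinishA_eq s n 2, List.drop_drop]
        norm_num [Nat.add_comm]
      · have hcond : ((s.length : Int) ≤ (n : Int) + 1 ∨ PySem.List.pyGet? s ((n : Int) + 1) ≠ some 'r') := by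
          right
          rw [hc1, PySem.List.pyGet?_natCast]
          exact hr
        rw [if_pos hcond, if_neg (by rintro ⟨-, h⟩; rw [h1] at h; exact hr h),
          if_neg (by rw [h0, hb]; simp)]
    · rw [if_neg hb]
      by_cases hrr : s[n] = 'r'
      · rw [if_pos hrr, if_neg (by rintro ⟨h, -⟩; rw [h0] at h; simp at h; exact hb h),
          if_pos (by rw [h0, hrr])]
        have : ((n : Int) + 1) = (n : Int) + ((1 : Nat) : Int) := by norm_num
        rw [this, rawFinishA_eq s n 1, List.drop_drop]
        norm_num [Nat.add_comm]
      · rw [if_neg hrr, if_neg (by rintro ⟨h, -⟩; rw [h0] at h; simp at h; exact hb h),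
          if_neg (by rw [h0]; intro h; simp at h; exact hrr h)]

lemma B_eq_ref (source : String) (n : Nat) :
    raw_string_prefix_py_alt source (n : Int) = refF (source.toList.drop n) := by
  unfold raw_string_prefix_py_alt refF
  rw [PySem.List.slice_from_natCast]
  set t := source.toList.drop n with ht
  have hd2 : PySem.List.slice t (some 2) none = t.drop 2 := by
    rw [show ((2 : Int)) = ((2 : Nat) : Int) by norm_num, PySem.List.slice_from_natCast]
  have hd1 : PySem.List.slice t (some 1) none = t.drop 1 := by
    rw [show ((1 : Int)) = ((1 : Nat) : Int) by norm_num, PySem.List.slice_from_natCast]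
  have altFin : ∀ p : Nat, p ≤ t.length → altFinishB t (t.drop p) = refFin (p : Int) (t.drop p) := by
    intro p hp
    unfold altFinishB refFin
    dsimp only
    set body := t.drop p with hbody
    set k := (body.takeWhile (· == '#')).length with hk
    have hkle : k ≤ body.length := by
      rw [hk]; simpa using List.IsPrefix.length_le (List.takeWhile_prefix _)
    have hslen : (body.dropWhile (· == '#')).length = body.length - k := by
      rw [dropWhile_eq_drop_takeWhile, ← hk, List.length_drop]
    have hblen : body.length = t.length - p := by rw [hbody, List.length_drop]
    by_cases hq : (body.dropWhile (· == '#'))[0]? = some '"'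
    · rw [if_pos ((startswith_single_iff _ _).mpr hq), if_pos hq]
      simp only [Option.some.injEq, Prod.mk.injEq, hslen, hblen]
      constructor <;> omega
    · rw [if_neg (fun h => hq ((startswith_single_iff _ _).mp h)), if_neg hq]
  by_cases hbr : t[0]? = some 'b' ∧ t[1]? = some 'r'
  · have hlen : 2 ≤ t.length := by
      rcases hbr with ⟨-, h1⟩
      by_contra hge
      rw [List.getElem?_eq_none (by omega)] at h1
      simp at h1
    rw [if_pos ((startswith_pair_iff t 'b' 'r').mpr hbr), hd2, if_pos hbr]
    exact_mod_cast altFin 2 hlen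
  · rw [if_neg (fun h => hbr ((startswith_pair_iff t 'b' 'r').mp h)), if_neg hbr]
    by_cases hr : t[0]? = some 'r'
    · have hlen : 1 ≤ t.length := by
        by_contra hge
        rw [List.getElem?_eq_none (by omega)] at hr
        simp at hr
      rw [if_pos ((startswith_single_iff t 'r').mpr hr), hd1, if_pos hr]
      exact_mod_cast altFin 1 hlen
    · rw [if_neg (fun h => hr ((startswith_single_iff t 'r').mp h)), if_neg hr]

-- ===== VERDICT (by name: the statement is the Claim_ definition above) =====
theorem raw_string_prefix_py_spec : Claim_equal_raw_string_prefix_py := by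
  intro source start _ hpre
  unfold Spec_raw_string_prefix_py
  obtain ⟨n, rfl⟩ : ∃ n : Nat, start = (n : Int) := ⟨start.toNat, (Int.toNat_of_nonneg hpre).symm⟩
  rw [A_eq_ref, B_eq_ref]
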